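-- pv_equiv track=rewrite | github.com/swapnilg915/FAQ_Bot_using_BERT | pdf_bot/data_maker/json2solrJSON.py | findChilds
-- ===== SOURCE A (Python) =====
-- def findChilds(child_list, current_tag):
--     main_child_list = []
--     child_h_tag = []
--     immidiate_child = ""
--     immidiate_child_flag = 1
--     direct_p_t_flag = 1
--     child_h_flag = 0
--     break_child_h_no = 0
--     if current_tag == 'p': # for p tags
--         return []
--     elif current_tag.startswith('t'): # for t tags
--         return []
--     else:
--         if current_tag.startswith("h"): # for h tags
--             heading_number = int(current_tag[-1])
--             if child_list:
--                 for each in child_list: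
--                     if child_h_flag == 0:
--                         if each['tag_name'].startswith('h') and (int(each['tag_name'][-1]) > heading_number):
--                             main_child_list.append(each['my_id'])
--                             child_h_tag.append(each["tag_name"])
--                             break_child_h_no = int(each['tag_name'][-1])
--                             immidiate_child_flag = 0
--                             child_h_flag = 1
--                         elif each['tag_name'].startswith('h') and (int(each['tag_name'][-1]) <= heading_number):
--                             immidiate_child_flag = 0
--                             break
--                         # elif each['tag_name'] == immidiate_child:
--                         #     main_child_list.append(each['my_id'])
--                         if immidiate_child_flag == 1: # if p,b or t tags are immidiate to h tag, add as child of h, else not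
--                             if each['tag_name'].startswith('b'):
--                                 main_child_list.append(each['my_id'])
--                                 immidiate_child = each['tag_name']
--                                 direct_p_t_flag = 0
--                             elif each['tag_name'].startswith('p'):
--                                 if direct_p_t_flag == 1:
--                                     main_child_list.append(each['my_id'])
--                                     immidiate_child = each['tag_name']
--                             else:  # else startswith('t'):
--                                 if direct_p_t_flag == 1:
--                                     main_child_list.append(each['my_id'])
--                                     immidiate_child = each['tag_name']
--                     else:
--                         if each['tag_name'].startswith("h"):
--                             if int(each['tag_name'][-1]) < break_child_h_no:
--                                 break
--                             elif each['tag_name'] == child_h_tag[0]: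
--                                 main_child_list.append(each['my_id'])
--                             else:
--                                 pass
--             return main_child_list
--         else: # for b tags
--             if child_list:
--                 for each in child_list:
--                     if each['tag_name'] == 'p':
--                         main_child_list.append(each['my_id'])
--                     elif each['tag_name'].startswith('t'):
--                         main_child_list.append(each['my_id'])
--                     else:
--                         break
--             return main_child_list
-- ===== SOURCE B (Python) =====
-- def findChilds(child_list, current_tag):
--     # Declarative rewrite: split the list at structural boundaries with a span
--     # helper, then build the result with comprehensions (no flag state machine).
--     if current_tag == 'p' or current_tag.startswith('t'):
--         return []
--     pairs = [(e['tag_name'], e['my_id']) for e in child_list]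
--     if not current_tag.startswith('h'):
--         run, _ = _span(pairs, lambda t: t == 'p' or t.startswith('t'))
--         return [i for (t, i) in run]
--     level = int(current_tag[-1])
--     head, tail = _span(pairs, lambda t: not t.startswith('h'))
--     bs, after_b = _span(head, lambda t: not t.startswith('b'))
--     out = [i for (t, i) in bs] + [i for (t, i) in after_b if t.startswith('b')]
--     if not tail:
--         return out
--     (t0, i0), rest = tail[0], tail[1:]
--     n0 = int(t0[-1])
--     if n0 <= level:
--         return out
--     body, _ = _span(rest, lambda t: not (t.startswith('h') and int(t[-1]) < n0))
--     return out + [i0] + [i for (t, i) in body if t == t0]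
--
-- def _span(pairs, pred):
--     for k, (t, _) in enumerate(pairs):
--         if not pred(t):
--             return pairs[:k], pairs[k:]
--     return pairs, []
-- ===== Notes on version B (the rewrite author's own statement) =====
-- stated objective: simpler
-- what changed: A's single stateful scan with five flag variables is replaced by a declarative decomposition: a span helper splits the list at the structural boundaries (first heading, first 'b', sub-heading break point) and the result is assembled from the segments with comprehensions/filters, so no flag state is threaded through any loop.
-- outside the precondition, e.g. on findChilds([{'tag_name': 'x'}, {'tag_name': 'h'}], 'b'): A returns [], B raises KeyError; on findChilds([{'tag_name': 'h1', 'my_id': '1'}, {}], 'h1'): A returns [], B raises KeyError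
import Mathlib
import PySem

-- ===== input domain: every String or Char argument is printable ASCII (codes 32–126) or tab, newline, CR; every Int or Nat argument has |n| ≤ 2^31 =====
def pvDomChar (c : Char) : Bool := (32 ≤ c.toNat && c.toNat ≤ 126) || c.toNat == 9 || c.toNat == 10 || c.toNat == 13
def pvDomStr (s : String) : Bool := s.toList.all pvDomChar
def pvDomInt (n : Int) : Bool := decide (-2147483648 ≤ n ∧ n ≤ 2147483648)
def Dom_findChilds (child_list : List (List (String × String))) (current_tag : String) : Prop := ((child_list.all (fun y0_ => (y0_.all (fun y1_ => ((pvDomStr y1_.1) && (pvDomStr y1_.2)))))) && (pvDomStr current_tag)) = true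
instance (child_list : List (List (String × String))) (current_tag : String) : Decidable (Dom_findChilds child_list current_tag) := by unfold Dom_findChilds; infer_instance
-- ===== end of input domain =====

-- B replaces A's flag-driven state machine by a declarative decomposition: split the list at
-- structural boundaries with a span helper and build the result with filters/maps (objective:
-- simpler). Return value only; neither version mutates its arguments.

-- ===== PORT A =====
-- each['tag_name'] / each['my_id'] : dict lookup; Pre_ guarantees the key is present (getD is
-- exact there; Python raises KeyError outside Pre_).
def pvTag (e : List (String × String)) : String := ((PySem.Dict.mk e).get? "tag_name").getD ""
def pvId (e : List (String × String)) : String := ((PySem.Dict.mk e).get? "my_id").getD ""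
-- int(t[-1]); Pre_ guarantees the last character exists and parses (Python raises otherwise).
def pvNum (t : String) : Int := ((PySem.Str.pyGet? t (-1)).bind (fun c => PySem.Int.ofChars? [c])).getD 0

-- A's 'h'-branch for-loop, carrying A's full mutable state
-- (main_child_list, child_h_tag, immidiate_child, immidiate_child_flag, direct_p_t_flag, child_h_flag, break_child_h_no)
def findChildsLoopH (hn : Int) :
    List (List (String × String)) → List String → List String → String → Int → Int → Int → Int → List String
  | [], main, _cht, _ic, _icf, _dpt, _chf, _bno => main
  | each :: rest, main, cht, ic, icf, dpt, chf, bno =>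
    if chf == 0 then
      if PySem.Str.startswith (pvTag each) "h" && decide (pvNum (pvTag each) > hn) then
        -- appends id and tag, sets break no, immidiate_child_flag := 0, child_h_flag := 1
        -- (the following 'if immidiate_child_flag == 1' block is then skipped)
        findChildsLoopH hn rest (main ++ [pvId each]) (cht ++ [pvTag each]) ic 0 dpt 1 (pvNum (pvTag each))
      else if PySem.Str.startswith (pvTag each) "h" && decide (pvNum (pvTag each) ≤ hn) then
        main  -- break
      else
        if icf == 1 then
          if PySem.Str.startswith (pvTag each) "b" then
            findChildsLoopH hn rest (main ++ [pvId each]) cht (pvTag each) icf 0 chf bno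
          else if PySem.Str.startswith (pvTag each) "p" then
            if dpt == 1 then findChildsLoopH hn rest (main ++ [pvId each]) cht (pvTag each) icf dpt chf bno
            else findChildsLoopH hn rest main cht ic icf dpt chf bno
          else
            if dpt == 1 then findChildsLoopH hn rest (main ++ [pvId each]) cht (pvTag each) icf dpt chf bno
            else findChildsLoopH hn rest main cht ic icf dpt chf bno
        else findChildsLoopH hn rest main cht ic icf dpt chf bno
    else
      if PySem.Str.startswith (pvTag each) "h" then
        if decide (pvNum (pvTag each) < bno) then main  -- break
        else if pvTag each == ((PySem.List.pyGet? cht 0).getD "") then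
          findChildsLoopH hn rest (main ++ [pvId each]) cht ic icf dpt chf bno
        else findChildsLoopH hn rest main cht ic icf dpt chf bno
      else findChildsLoopH hn rest main cht ic icf dpt chf bno

-- A's final 'b'-branch for-loop
def findChildsLoopB : List (List (String × String)) → List String → List String
  | [], main => main
  | each :: rest, main =>
    if pvTag each == "p" then findChildsLoopB rest (main ++ [pvId each])
    else if PySem.Str.startswith (pvTag each) "t" then findChildsLoopB rest (main ++ [pvId each])
    else main  -- break

def findChilds (child_list : List (List (String × String))) (current_tag : String) : List String :=
  if current_tag == "p" then []
  else if PySem.Str.startswith current_tag "t" then []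
  else if PySem.Str.startswith current_tag "h" then
    findChildsLoopH (pvNum current_tag) child_list [] [] "" 1 1 0 0
  else findChildsLoopB child_list []

-- ===== PORT B =====
-- Source B's hand-written _span helper: longest prefix whose tags satisfy pred, and the rest
def pvSpanB (pred : String → Bool) : List (String × String) → List (String × String) × List (String × String)
  | [] => ([], [])
  | (t, i) :: rest =>
    if pred t then
      let r := pvSpanB pred rest
      ((t, i) :: r.1, r.2)
    else ([], (t, i) :: rest)

def findChilds_alt (child_list : List (List (String × String))) (current_tag : String) : List String :=
  if current_tag == "p" || PySem.Str.startswith current_tag "t" then []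
  else
    let pairs := child_list.map (fun e => (pvTag e, pvId e))
    if !(PySem.Str.startswith current_tag "h") then
      ((pvSpanB (fun t => t == "p" || PySem.Str.startswith t "t") pairs).1.map Prod.snd)
    else
      let level := pvNum current_tag
      let s1 := pvSpanB (fun t => !(PySem.Str.startswith t "h")) pairs
      let s2 := pvSpanB (fun t => !(PySem.Str.startswith t "b")) s1.1
      let out := s2.1.map Prod.snd ++ (s2.2.filter (fun p => PySem.Str.startswith p.1 "b")).map Prod.snd
      match s1.2 with
      | [] => out
      | (t0, i0) :: rest =>
        if pvNum t0 ≤ level then out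
        else
          let body := (pvSpanB (fun t => !(PySem.Str.startswith t "h" && decide (pvNum t < pvNum t0))) rest).1
          out ++ [i0] ++ (body.filter (fun p => p.1 == t0)).map Prod.snd

-- ===== PRECONDITION & SPEC =====
-- Pre_ excludes exactly the inputs where Python A raises (KeyError on a missing 'tag_name'/'my_id',
-- ValueError/IndexError from int(tag[-1])), plus — a stated narrowing — inputs where such a
-- malformed element sits only AFTER the point at which A's scan breaks, so A still returns;
-- checking "reached" elements only would mean re-simulating the scan, so Pre_ constrains every element.
def Pre_findChilds (child_list : List (List (String × String))) (current_tag : String) : Prop :=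
  (¬ current_tag = "p" ∧ PySem.Str.startswith current_tag "t" = false) →
    ((PySem.Str.startswith current_tag "h" = true →
        ((PySem.Str.pyGet? current_tag (-1)).bind (fun c => PySem.Int.ofChars? [c])).isSome = true) ∧
     ∀ e ∈ child_list,
       ((PySem.Dict.mk e).get? "tag_name").isSome = true ∧
       ((PySem.Dict.mk e).get? "my_id").isSome = true ∧
       (PySem.Str.startswith (((PySem.Dict.mk e).get? "tag_name").getD "") "h" = true →
         ((PySem.Str.pyGet? (((PySem.Dict.mk e).get? "tag_name").getD "") (-1)).bind
             (fun c => PySem.Int.ofChars? [c])).isSome = true))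
instance (child_list : List (List (String × String))) (current_tag : String) : Decidable (Pre_findChilds child_list current_tag) := by unfold Pre_findChilds; infer_instance

def pvWitness_findChilds : (List (List (String × String))) × String :=
  ([[("tag_name", "b"), ("my_id", "1")], [("tag_name", "h2"), ("my_id", "2")], [("tag_name", "h2"), ("my_id", "3")]], "h1")

def Spec_findChilds (child_list : List (List (String × String))) (current_tag : String) (out : List String) : Prop := out = findChilds_alt child_list current_tag
instance (child_list : List (List (String × String))) (current_tag : String) (out : List String) : Decidable (Spec_findChilds child_list current_tag out) := by unfold Spec_findChilds; infer_instance

-- ===== CLAIM (what is proved, stated in full; the proofs are below) =====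
def Claim_equal_findChilds : Prop := ∀ (child_list : List (List (String × String))) (current_tag : String), Dom_findChilds child_list current_tag → Pre_findChilds child_list current_tag → Spec_findChilds child_list current_tag (findChilds child_list current_tag)

-- ===== LEMMAS AND PROOFS =====

-- proof-side abbreviations for the pieces of B's h-branch
def pvTailPart (level : Int) : List (String × String) → List String
  | [] => []
  | (t0, i0) :: rest =>
    if pvNum t0 ≤ level then []
    else
      [i0] ++ ((pvSpanB (fun t => !(PySem.Str.startswith t "h" && decide (pvNum t < pvNum t0))) rest).1.filter
          (fun p => p.1 == t0)).map Prod.snd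

-- B's h-branch result when a 'b' has already been seen (A's direct_p_t_flag = 0)
def pvHBodyB (level : Int) (pairs : List (String × String)) : List String :=
  let s1 := pvSpanB (fun t => !(PySem.Str.startswith t "h")) pairs
  (s1.1.filter (fun p => PySem.Str.startswith p.1 "b")).map Prod.snd ++ pvTailPart level s1.2

-- B's h-branch result before any 'b' (A's direct_p_t_flag = 1)
def pvHBody (level : Int) (pairs : List (String × String)) : List String :=
  let s1 := pvSpanB (fun t => !(PySem.Str.startswith t "h")) pairs
  let s2 := pvSpanB (fun t => !(PySem.Str.startswith t "b")) s1.1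
  s2.1.map Prod.snd ++ (s2.2.filter (fun p => PySem.Str.startswith p.1 "b")).map Prod.snd ++ pvTailPart level s1.2

-- A's 'b'-branch loop is the accumulator ++ B's span-then-map
theorem loopB_eq (l : List (List (String × String))) :
    ∀ main, findChildsLoopB l main =
      main ++ ((pvSpanB (fun t => t == "p" || PySem.Str.startswith t "t")
                  (l.map (fun e => (pvTag e, pvId e)))).1.map Prod.snd) := by
  induction l with
  | nil => intro main; simp [findChildsLoopB, pvSpanB]
  | cons each rest ih =>
    intro main
    simp only [findChildsLoopB, List.map, pvSpanB]
    by_cases h1 : pvTag each = "p"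
    · simp [h1, ih]
    · by_cases h2 : PySem.Chars.startswith (pvTag each).toList ['t'] = true
      · simp [h1, h2, ih]
      · simp [h1, h2]

-- A's loop after the boundary heading (child_h_flag = 1, child_h_tag = [st]) is span+filter
theorem loopH_tail_eq (hn : Int) (st : String) (hst : PySem.Str.startswith st "h" = true)
    (l : List (List (String × String))) :
    ∀ main ic icf dpt, findChildsLoopH hn l main [st] ic icf dpt 1 (pvNum st) =
      main ++ ((pvSpanB (fun t => !(PySem.Str.startswith t "h" && decide (pvNum t < pvNum st)))
                  (l.map (fun e => (pvTag e, pvId e)))).1.filter (fun p => p.1 == st)).map Prod.snd := by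
  induction l with
  | nil => intro main ic icf dpt; simp [findChildsLoopH, pvSpanB]
  | cons each rest ih =>
    intro main ic icf dpt
    simp only [findChildsLoopH, List.map, pvSpanB]
    by_cases hh : PySem.Chars.startswith (pvTag each).toList ['h'] = true
    · by_cases hl : pvNum (pvTag each) < pvNum st
      · simp [hh, hl]
      · by_cases he : pvTag each = st
        · subst he; simp [hh, ih]
        · simp [hh, hl, he, ih]
    · have hne : ¬ pvTag each = st := by
        intro h; rw [h] at hh; exact hh hst
      simp [hh, hne, ih]

-- A's loop before any heading: depends only on whether direct_p_t_flag is still 1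
theorem loopH_head_eq (hn : Int) (l : List (List (String × String))) :
    ∀ main ic (dpt : Int) bno,
      findChildsLoopH hn l main [] ic 1 dpt 0 bno =
        main ++ (if dpt == 1 then pvHBody hn (l.map (fun e => (pvTag e, pvId e)))
                 else pvHBodyB hn (l.map (fun e => (pvTag e, pvId e)))) := by
  induction l with
  | nil =>
    intro main ic dpt bno
    by_cases hd : dpt = 1 <;>
      simp [findChildsLoopH, pvHBody, pvHBodyB, pvSpanB, pvTailPart, hd]
  | cons each rest ih =>
    intro main ic dpt bno
    simp only [findChildsLoopH, List.map]
    by_cases hh : PySem.Chars.startswith (pvTag each).toList ['h'] = true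
    · by_cases hgt : pvNum (pvTag each) > hn
      · have htail := loopH_tail_eq hn (pvTag each) hh
        by_cases hd : dpt = 1 <;>
          simp [hh, hgt, hd, htail, pvHBody, pvHBodyB, pvSpanB, pvTailPart, not_le.mpr hgt]
      · have hle : pvNum (pvTag each) ≤ hn := by omega
        by_cases hd : dpt = 1 <;>
          simp [hh, hgt, hd, pvHBody, pvHBodyB, pvSpanB, pvTailPart, hle]
    · by_cases hb : PySem.Chars.startswith (pvTag each).toList ['b'] = true
      · by_cases hd : dpt = 1 <;>
          simp [hh, hb, hd, ih, pvHBody, pvHBodyB, pvSpanB]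
      · by_cases hp : PySem.Chars.startswith (pvTag each).toList ['p'] = true <;>
          by_cases hd : dpt = 1 <;>
            simp [hh, hb, hp, hd, ih, pvHBody, pvHBodyB, pvSpanB]

-- B's h-branch expression is pvHBody
theorem alt_h_eq (pairs : List (String × String)) (level : Int) :
    (let s1 := pvSpanB (fun t => !(PySem.Str.startswith t "h")) pairs
     let s2 := pvSpanB (fun t => !(PySem.Str.startswith t "b")) s1.1
     let out := s2.1.map Prod.snd ++ (s2.2.filter (fun p => PySem.Str.startswith p.1 "b")).map Prod.snd
     match s1.2 with
     | [] => out
     | (t0, i0) :: rest =>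
       if pvNum t0 ≤ level then out
       else
         let body := (pvSpanB (fun t => !(PySem.Str.startswith t "h" && decide (pvNum t < pvNum t0))) rest).1
         out ++ [i0] ++ (body.filter (fun p => p.1 == t0)).map Prod.snd) = pvHBody level pairs := by
  simp only [pvHBody, pvTailPart]
  rcases h : (pvSpanB (fun t => !(PySem.Str.startswith t "h")) pairs).2 with _ | ⟨⟨t0, i0⟩, rest⟩
  · simp
  · by_cases hle : pvNum t0 ≤ level <;> simp [hle, List.append_assoc]

-- ===== VERDICT (by name: the statement is the Claim_ definition above) =====
theorem findChilds_spec : Claim_equal_findChilds := by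
  intro child_list current_tag _dom _pre
  unfold Spec_findChilds findChilds findChilds_alt
  by_cases h1 : current_tag = "p"
  · simp [h1]
  · by_cases h2 : PySem.Chars.startswith current_tag.toList ['t'] = true
    · simp [h1, h2]
    · by_cases h3 : PySem.Chars.startswith current_tag.toList ['h'] = true
      · rw [loopH_head_eq, ← alt_h_eq (child_list.map (fun e => (pvTag e, pvId e))) (pvNum current_tag)]
        simp [h1, h2, h3]
      · simp [h1, h2, h3, loopB_eq]
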